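-- pv_equiv track=rewrite | github.com/ferronn-dev/addonmaker | py2lua.py | luaquote
-- ===== SOURCE A (Python) =====
-- def luaquote(string):
--     """Quotes a python string as a Lua string literal."""
--     replacements = [
--         ('\\', '\\\\'),
--         ('\'', '\\\''),
--         ('\n', '\\n'),
--     ]
--     for old, new in replacements:
--         string = string.replace(old, new)
--     return '\'' + string + '\''
-- ===== SOURCE B (Python) =====
-- def luaquote(string):
--     """Quotes a python string as a Lua string literal."""
--     esc = {'\\': '\\\\', '\'': '\\\'', '\n': '\\n'}
--     return '\'' + ''.join(esc.get(ch, ch) for ch in string) + '\''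
-- ===== Notes on version B (the rewrite author's own statement) =====
-- stated objective: alternative
-- what changed: Replaces three sequential full-string replace passes with a single character-by-character pass driven by an escape-map dict, joining the escaped pieces once.
import Mathlib
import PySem

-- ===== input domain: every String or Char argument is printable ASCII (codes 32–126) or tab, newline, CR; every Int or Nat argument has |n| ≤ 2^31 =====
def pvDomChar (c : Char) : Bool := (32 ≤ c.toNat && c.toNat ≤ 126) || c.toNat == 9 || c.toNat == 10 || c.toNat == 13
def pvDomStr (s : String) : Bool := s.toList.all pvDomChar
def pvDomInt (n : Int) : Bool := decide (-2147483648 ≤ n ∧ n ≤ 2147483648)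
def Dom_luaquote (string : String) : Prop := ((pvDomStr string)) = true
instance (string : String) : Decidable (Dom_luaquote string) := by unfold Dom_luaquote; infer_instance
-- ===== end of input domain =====

-- B replaces A's three sequential full-string replace passes with one char-by-char
-- pass driven by an escape-map dict; same output (alternative decomposition).

-- ===== PORT A =====
def luaquote (string : String) : String :=
  -- for old, new in replacements: string = string.replace(old, new)
  let s1 := PySem.Str.replace string "\\" "\\\\"
  let s2 := PySem.Str.replace s1 "'" "\\'"
  let s3 := PySem.Str.replace s2 "\n" "\\n"
  "'" ++ s3 ++ "'"

-- ===== PORT B =====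
def luaquoteEsc : PySem.Dict Char String :=
  PySem.Dict.ofList [('\\', "\\\\"), ('\'', "\\'"), ('\n', "\\n")]

def luaquote_alt (string : String) : String :=
  "'" ++ PySem.Str.join "" (string.toList.map (fun ch => luaquoteEsc.getD ch (String.ofList [ch]))) ++ "'"

-- ===== PRECONDITION & SPEC =====
def Spec_luaquote (string : String) (out : String) : Prop := out = luaquote_alt string
instance (string : String) (out : String) : Decidable (Spec_luaquote string out) := by unfold Spec_luaquote; infer_instance

-- ===== CLAIM (what is proved, stated in full; the proofs are below) =====
def Claim_equal_luaquote : Prop := ∀ (string : String), Dom_luaquote string → Spec_luaquote string (luaquote string)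

-- ===== LEMMAS AND PROOFS =====

-- single-char replace is a flatMap over the characters
theorem replace_single (a : Char) (new : List Char) (s : List Char) :
    PySem.Chars.replace s [a] new = s.flatMap (fun c => if c = a then new else [c]) := by
  have go : ∀ (l acc : List Char) (fuel : Nat), l.length ≤ fuel →
      PySem.Chars.replace.go [a] new fuel l acc
        = acc.reverse ++ l.flatMap (fun c => if c = a then new else [c]) := by
    intro l
    induction l with
    | nil => intro acc fuel _; cases fuel <;> simp [PySem.Chars.replace.go]
    | cons c t ih =>
      intro acc fuel hf
      cases fuel with
      | zero => simp at hf
      | succ n =>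
        simp only [PySem.Chars.replace.go]
        by_cases h : c = a
        · subst h
          rw [if_pos (by simp [List.isPrefixOf])]
          simp only [List.length_cons, List.length_nil, List.drop_succ_cons, List.drop_zero]
          rw [ih _ n (by simpa using hf)]
          simp [List.flatMap_cons]
        · rw [if_neg (by simp [List.isPrefixOf, beq_iff_eq]; exact fun hh => h hh.symm)]
          rw [ih _ n (by simpa using hf)]
          simp [List.flatMap_cons, h]
  simp only [PySem.Chars.replace, List.isEmpty_cons, Bool.false_eq_true, if_false]
  exact go s [] s.length le_rfl

theorem intersperse_nil_flatten (l : List (List Char)) :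
    (List.intersperse ([] : List Char) l).flatten = l.flatten := by
  induction l with
  | nil => rfl
  | cons x xs ih =>
    cases xs with
    | nil => rfl
    | cons y ys => simpa [List.intersperse] using ih

-- three single-char replaces fuse into one flatMap with the combined escape table
theorem fused (s : List Char) :
    ((s.flatMap (fun c => if c = '\\' then ['\\','\\'] else [c])).flatMap
        (fun c => if c = '\'' then ['\\','\''] else [c])).flatMap
        (fun c => if c = '\n' then ['\\','n'] else [c])
      = s.flatMap (fun c =>
          if c = '\\' then ['\\','\\'] else
          if c = '\'' then ['\\','\''] else
          if c = '\n' then ['\\','n'] else [c]) := by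
  induction s with
  | nil => rfl
  | cons c t ih =>
    simp only [List.flatMap_cons, List.flatMap_append] at *
    rw [ih]
    congr 1
    by_cases h1 : c = '\\'
    · subst h1; decide
    by_cases h2 : c = '\''
    · subst h2; decide
    by_cases h3 : c = '\n'
    · subst h3; decide
    simp [h1, h2, h3]

theorem luaquote_eq (string : String) : luaquote string = luaquote_alt string := by
  apply String.toList_inj.mp
  simp only [luaquote, luaquote_alt, String.toList_append, PySem.Str.toList_replace,
    PySem.Str.toList_join, PySem.Chars.join, List.intercalate]
  congr 1
  congr 1
  have e1 : "\\".toList = ['\\'] := rfl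
  have e2 : "\\\\".toList = ['\\','\\'] := rfl
  have e3 : "'".toList = ['\''] := rfl
  have e4 : "\\'".toList = ['\\','\''] := rfl
  have e5 : "\n".toList = ['\n'] := rfl
  have e6 : "\\n".toList = ['\\','n'] := rfl
  have e7 : "".toList = ([] : List Char) := rfl
  rw [e1, e2, e3, e4, e5, e6, e7]
  rw [replace_single, replace_single, replace_single, fused]
  rw [intersperse_nil_flatten]
  rw [List.map_map, List.flatten_eq_flatMap, List.flatMap_map]
  apply List.flatMap_congr
  intro c _
  by_cases h1 : c = '\\'
  · subst h1; decide
  by_cases h2 : c = '\''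
  · subst h2; decide
  by_cases h3 : c = '\n'
  · subst h3; decide
  simp only [if_neg h1, if_neg h2, if_neg h3]
  have b1 : ('\\' == c) = false := by simp; exact fun hh => h1 hh.symm
  have b2 : ('\'' == c) = false := by simp; exact fun hh => h2 hh.symm
  have b3 : ('\n' == c) = false := by simp; exact fun hh => h3 hh.symm
  simp [luaquoteEsc, PySem.Dict.ofList, PySem.Dict.update, PySem.Dict.getD,
    PySem.Dict.get?, PySem.Dict.insert, PySem.Dict.empty, List.find?, b1, b2, b3]

-- ===== VERDICT (by name: the statement is the Claim_ definition above) =====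
theorem luaquote_spec : Claim_equal_luaquote := by
  intro s _
  exact luaquote_eq s
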